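-- pv_equiv track=rewrite | github.com/theshevon/A2-COMP30024 | power_puff_boys/board.py | get_neighbouring_nodes
-- ===== SOURCE A (Python) =====
-- def get_neighbouring_nodes(node):
--     '''returns a list of possible neighbouring nodes'''
--
--     neighbours = []
--
--     r_start = node[1]
--     r_end = node[1] + 2
--     col = 0
--     for q in range(node[0]-1, node[0]+2):
--         for r in range(r_start, r_end):
--             possible_neighbour = (q,r)
--
--             if possible_neighbour != node:
--                 neighbours.append(possible_neighbour)
--
--         col += 1
--
--         if col == 1:
--             r_start -= 1
--
--         if col == 2:
--             r_end -= 1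
--
--     return neighbours
-- ===== SOURCE B (Python) =====
-- OFFSETS = [(-1, 0), (-1, 1), (0, -1), (0, 1), (1, -1), (1, 0)]
--
-- def get_neighbouring_nodes(node):
--     '''returns a list of possible neighbouring nodes'''
--     q, r = node
--     return [(q + dq, r + dr) for dq, dr in OFFSETS]
-- ===== Notes on version B (the rewrite author's own statement) =====
-- stated objective: idiomatic
-- what changed: Replaces the nested range loops with mutable r_start/r_end/col bookkeeping and a center-skip test by a single comprehension over a fixed table of the six hex neighbour offsets in the same emission order.
import Mathlib
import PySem

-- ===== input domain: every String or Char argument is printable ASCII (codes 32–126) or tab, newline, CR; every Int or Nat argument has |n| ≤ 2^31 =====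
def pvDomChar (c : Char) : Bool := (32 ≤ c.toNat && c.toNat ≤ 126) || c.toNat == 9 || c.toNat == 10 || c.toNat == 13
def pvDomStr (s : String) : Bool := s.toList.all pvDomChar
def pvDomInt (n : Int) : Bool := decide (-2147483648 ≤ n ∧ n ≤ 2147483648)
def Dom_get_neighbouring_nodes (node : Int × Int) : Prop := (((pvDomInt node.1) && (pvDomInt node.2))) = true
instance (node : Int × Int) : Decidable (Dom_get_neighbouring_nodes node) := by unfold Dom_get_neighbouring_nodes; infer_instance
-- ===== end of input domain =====

-- B replaces A's nested loops with variable range bounds by one comprehension over a fixed table of the six hex offsets (idiomatic, same order).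

-- ===== PORT A =====
-- state: (neighbours, r_start, r_end, col), updated exactly as A's loop body does
def get_neighbouring_nodes (node : Int × Int) : List (Int × Int) :=
  let init : List (Int × Int) × Int × Int × Int := ([], node.2, node.2 + 2, 0)
  let fin :=
    (PySem.List.pyRange (node.1 - 1) (node.1 + 2) 1).foldl
      (fun st q =>
        let neighbours := st.1
        let r_start := st.2.1
        let r_end := st.2.2.1
        let col := st.2.2.2
        let neighbours :=
          (PySem.List.pyRange r_start r_end 1).foldl
            (fun acc r =>
              let possible_neighbour := (q, r)
              if possible_neighbour ≠ node then acc ++ [possible_neighbour] else acc)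
            neighbours
        let col := col + 1
        let r_start := if col = 1 then r_start - 1 else r_start
        let r_end := if col = 2 then r_end - 1 else r_end
        (neighbours, r_start, r_end, col))
      init
  fin.1

-- ===== PORT B =====
def pvOffsets : List (Int × Int) := [(-1, 0), (-1, 1), (0, -1), (0, 1), (1, -1), (1, 0)]

def get_neighbouring_nodes_alt (node : Int × Int) : List (Int × Int) :=
  pvOffsets.map (fun d => (node.1 + d.1, node.2 + d.2))

-- ===== PRECONDITION & SPEC =====
def Spec_get_neighbouring_nodes (node : Int × Int) (out : List (Int × Int)) : Prop := out = get_neighbouring_nodes_alt node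
instance (node : Int × Int) (out : List (Int × Int)) : Decidable (Spec_get_neighbouring_nodes node out) := by unfold Spec_get_neighbouring_nodes; infer_instance

-- ===== CLAIM (what is proved, stated in full; the proofs are below) =====
def Claim_equal_get_neighbouring_nodes : Prop := ∀ (node : Int × Int), Dom_get_neighbouring_nodes node → Spec_get_neighbouring_nodes node (get_neighbouring_nodes node)

-- ===== LEMMAS AND PROOFS =====
theorem pyRange_three (x : Int) : PySem.List.pyRange (x - 1) (x + 2) 1 = [x - 1, x, x + 1] := by
  rw [PySem.List.pyRange_one_cons (by omega), PySem.List.pyRange_one_cons (by omega),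
      PySem.List.pyRange_one_cons (by omega), PySem.List.pyRange_one_eq_nil (by omega)]
  norm_num

theorem pyRange_two (x : Int) : PySem.List.pyRange x (x + 2) 1 = [x, x + 1] := by
  rw [PySem.List.pyRange_one_cons (by omega), PySem.List.pyRange_one_cons (by omega),
      PySem.List.pyRange_one_eq_nil (by omega)]


-- ===== VERDICT (by name: the statement is the Claim_ definition above) =====
theorem get_neighbouring_nodes_spec : Claim_equal_get_neighbouring_nodes := by
  intro node _
  obtain ⟨a, b⟩ := node
  show get_neighbouring_nodes (a, b) = get_neighbouring_nodes_alt (a, b)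
  unfold get_neighbouring_nodes get_neighbouring_nodes_alt pvOffsets
  simp only [pyRange_three, List.foldl_cons, List.foldl_nil]
  norm_num
  have e1 : PySem.List.pyRange (b - 1) (b + 2) 1 = [b - 1, b, b + 1] := by
    rw [PySem.List.pyRange_one_cons (by omega), PySem.List.pyRange_one_cons (by omega),
        PySem.List.pyRange_one_cons (by omega), PySem.List.pyRange_one_eq_nil (by omega)]
    norm_num
  have e2 : PySem.List.pyRange (b - 1) (b + 2 - 1) 1 = [b - 1, b] := by
    rw [PySem.List.pyRange_one_cons (by omega), PySem.List.pyRange_one_cons (by omega),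
        PySem.List.pyRange_one_eq_nil (by omega)]
    norm_num
  rw [e1, e2, pyRange_two b]
  have hb1 : ¬ (b - 1 = b) := by omega
  have hb2 : ¬ (b + 1 = b) := by omega
  simp only [List.foldl_cons, List.foldl_nil, List.map, List.flatten, hb1, hb2, if_false,
    if_true]
  norm_num
  omega
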